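-- pv_equiv track=rewrite | github.com/atlanswer/AoC | 2022/python/day3/part2.py | get_shared_item_priority
-- ===== SOURCE A (Python) =====
-- from functools import reduce
--
-- def get_priority(c: str):
--     if c.islower():
--         return ord(c) - ord("a") + 1
--     else:
--         return ord(c) - ord("A") + 27
--
-- def rusksack2binary(rucksack: str) -> int:
--     return reduce(lambda x, y: x | y, map(lambda c: 1 << get_priority(c), rucksack))
--
-- def get_shared_item_priority(group: list[str]):
--     count = 0
--     compare_result = (
--         rusksack2binary(group[0])
--         & rusksack2binary(group[1])
--         & rusksack2binary(group[2])
--     )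
--     while compare_result:
--         count += 1
--         compare_result >>= 1
--     return count - 1
-- ===== SOURCE B (Python) =====
-- def get_priority(c: str):
--     if c.islower():
--         return ord(c) - ord("a") + 1
--     else:
--         return ord(c) - ord("A") + 27
--
-- def get_shared_item_priority(group: list[str]):
--     common = (
--         set(map(get_priority, group[0]))
--         & set(map(get_priority, group[1]))
--         & set(map(get_priority, group[2]))
--     )
--     return max(common) if common else -1
-- ===== Notes on version B (the rewrite author's own statement) =====
-- stated objective: idiomatic
-- what changed: Replaces A's per-rucksack bit masks (reduce of 1<<priority ORs), bitwise AND and a shift-count loop by building the set of priorities of each of the three rucksacks, intersecting them with set &, and returning max(common) (or -1 if empty), which equals the index of the highest common bit.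
import Mathlib
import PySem

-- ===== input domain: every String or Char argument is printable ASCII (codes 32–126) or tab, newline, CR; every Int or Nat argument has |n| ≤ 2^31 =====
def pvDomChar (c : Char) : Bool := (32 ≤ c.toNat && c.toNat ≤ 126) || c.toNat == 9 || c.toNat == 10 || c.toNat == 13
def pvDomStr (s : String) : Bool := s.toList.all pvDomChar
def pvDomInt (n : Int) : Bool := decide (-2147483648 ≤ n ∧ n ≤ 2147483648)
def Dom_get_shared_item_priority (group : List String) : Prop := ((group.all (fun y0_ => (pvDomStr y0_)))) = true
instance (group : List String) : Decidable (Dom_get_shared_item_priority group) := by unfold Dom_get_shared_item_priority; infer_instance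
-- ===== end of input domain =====

-- B replaces A's bitmask OR/AND plus shift-count loop by priority sets, set intersection and max() (idiomatic; same value on all admitted inputs).

-- ===== PORT A =====
def get_priority (c : Char) : Int :=
  if PySem.Chars.islower c then (c.toNat : Int) - 97 + 1 else (c.toNat : Int) - 65 + 27

-- reduce(|, map(…)) with no initializer; Python raises TypeError on "" (excluded by Pre_).
-- masks are nonnegative Python ints, kept as Nat; '1 << p' raises for p < 0 (excluded by Pre_).
def rusksack2binary (rucksack : String) : Nat :=
  match rucksack.toList.map (fun c => 1 <<< (get_priority c).toNat) with
  | [] => 0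
  | x :: xs => xs.foldl (fun a b => a ||| b) x

-- the 'while compare_result: count += 1; compare_result >>= 1' loop; returns count - 1
def shiftLoop (compare_result : Nat) (count : Int) : Int :=
  if h : compare_result = 0 then count - 1
  else shiftLoop (compare_result >>> 1) (count + 1)
termination_by compare_result
decreasing_by
  simp only [Nat.shiftRight_succ, Nat.shiftRight_zero]
  exact Nat.div_lt_self (Nat.pos_of_ne_zero h) (by omega)

def get_shared_item_priority (group : List String) : Int :=
  let compare_result :=
    rusksack2binary (group.getD 0 "") &&& rusksack2binary (group.getD 1 "")
      &&& rusksack2binary (group.getD 2 "")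
  shiftLoop compare_result 0

-- ===== PORT B =====
def get_priority_b (c : Char) : Int :=
  if PySem.Chars.islower c then (c.toNat : Int) - 97 + 1 else (c.toNat : Int) - 65 + 27

def prioSet (s : String) : PySem.Set Int :=
  PySem.Set.ofList (s.toList.map get_priority_b)

def get_shared_item_priority_alt (group : List String) : Int :=
  let common :=
    PySem.Set.inter (PySem.Set.inter (prioSet (group.getD 0 "")) (prioSet (group.getD 1 "")))
      (prioSet (group.getD 2 ""))
  if common = [] then -1 else (PySem.List.max? common (fun x => x)).getD (-1)

-- ===== PRECONDITION & SPEC =====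
-- Pre_ excludes exactly the inputs where A raises: fewer than three rucksacks (IndexError),
-- an empty rucksack among the first three (TypeError in reduce), or an item with code < 38,
-- whose priority is negative so '1 << priority' raises ValueError.
def Pre_get_shared_item_priority (group : List String) : Prop :=
  3 ≤ group.length ∧
    ((group.take 3).all (fun s => !s.toList.isEmpty && s.toList.all (fun c => 38 ≤ c.toNat))) = true
instance (group : List String) : Decidable (Pre_get_shared_item_priority group) := by
  unfold Pre_get_shared_item_priority; infer_instance

def pvWitness_get_shared_item_priority : List String := ["ab", "bc", "cb"]

def Spec_get_shared_item_priority (group : List String) (out : Int) : Prop :=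
  out = get_shared_item_priority_alt group
instance (group : List String) (out : Int) : Decidable (Spec_get_shared_item_priority group out) := by
  unfold Spec_get_shared_item_priority; infer_instance

-- ===== CLAIM (what is proved, stated in full; the proofs are below) =====
def Claim_equal_get_shared_item_priority : Prop :=
  ∀ (group : List String), Dom_get_shared_item_priority group →
    Pre_get_shared_item_priority group →
      Spec_get_shared_item_priority group (get_shared_item_priority group)


-- ===== LEMMAS AND PROOFS =====

theorem gp_b_eq : get_priority_b = get_priority := rfl

theorem gp_nonneg {c : Char} (h : 38 ≤ c.toNat) : 0 ≤ get_priority c := by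
  unfold get_priority
  split
  · rename_i hl
    simp only [PySem.Chars.islower, Bool.and_eq_true, decide_eq_true_eq] at hl
    have hle := UInt32.le_iff_toNat_le.1 (Char.le_def.1 hl.1)
    have h97 : (97:Nat) ≤ c.val.toNat := le_trans (by decide) hle
    have hca : c.toNat = c.val.toNat := rfl
    omega
  · omega

theorem foldl_or_testBit (xs : List Nat) (a q : Nat) :
    (xs.foldl (fun a b => a ||| b) a).testBit q = (a.testBit q || xs.any (fun x => x.testBit q)) := by
  induction xs generalizing a with
  | nil => simp
  | cons x xs ih => simp [List.foldl_cons, ih, Nat.testBit_or, Bool.or_assoc]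

theorem testBit_rusksack2binary (s : String) (hs : s.toList ≠ []) (q : Nat) :
    (rusksack2binary s).testBit q = s.toList.any (fun d => decide ((get_priority d).toNat = q)) := by
  unfold rusksack2binary
  obtain ⟨c, cs, h⟩ := List.exists_cons_of_ne_nil hs
  rw [h]
  simp only [List.map_cons]
  rw [foldl_or_testBit]
  simp [Nat.one_shiftLeft, Nat.testBit_two_pow, List.any_map, Function.comp_def]

theorem shiftLoop_eq (m : Nat) : ∀ c : Int, shiftLoop m c = c + (PySem.Int.bitLength (m : Int) : Int) - 1 := by
  induction m using Nat.strong_induction_on with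
  | _ m ih =>
    intro c
    rw [shiftLoop]
    by_cases h : m = 0
    · simp [h, PySem.Int.bitLength_zero]
    · rw [dif_neg h, Nat.shiftRight_one,
        ih (m / 2) (Nat.div_lt_self (Nat.pos_of_ne_zero h) (by omega)),
        PySem.Int.bitLength_natCast (Nat.pos_of_ne_zero h)]
      push_cast
      ring

theorem testBit_of_bounds {m L : Nat} (h1 : 2^L ≤ m) (h2 : m < 2^(L+1)) : m.testBit L = true := by
  have hp : 0 < (2:Nat)^L := Nat.two_pow_pos L
  have hd : m / 2^L = 1 := by
    have hlt : m / 2^L < 2 := (Nat.div_lt_iff_lt_mul hp).2 (by rw [mul_comm, ← pow_succ]; exact h2)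
    have hge : 1 ≤ m / 2^L := (Nat.le_div_iff_mul_le hp).2 (by omega)
    omega
  rw [Nat.testBit_eq_decide_div_mod_eq, hd]
  decide

theorem size_pred_spec {m : Nat} (hm : m ≠ 0) :
    m.testBit (PySem.Int.bitLength (m:Int) - 1) = true ∧
      ∀ q, m.testBit q = true → q ≤ PySem.Int.bitLength (m:Int) - 1 := by
  have hL2 : m < 2 ^ PySem.Int.bitLength (m:Int) := by
    have := PySem.Int.lt_two_pow_bitLength (m:Int)
    simpa using this
  have hLpos : 1 ≤ PySem.Int.bitLength (m:Int) := by
    by_contra h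
    have h0 : PySem.Int.bitLength (m:Int) = 0 := by omega
    rw [h0, pow_zero] at hL2
    omega
  have hL1 : 2 ^ (PySem.Int.bitLength (m:Int) - 1) ≤ m := by
    have := PySem.Int.two_pow_bitLength_le (m:Int) (by exact_mod_cast hm)
    simpa using this
  refine ⟨testBit_of_bounds hL1 (by rwa [Nat.sub_add_cancel hLpos]), ?_⟩
  intro q hq
  have hge := Nat.ge_two_pow_of_testBit hq
  have hqL : q < PySem.Int.bitLength (m:Int) := by
    by_contra hc
    have : 2 ^ PySem.Int.bitLength (m:Int) ≤ 2 ^ q := Nat.pow_le_pow_right (by omega) (by omega)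
    omega
  omega

-- ===== VERDICT (by name: the statement is the Claim_ definition above) =====
theorem get_shared_item_priority_spec : Claim_equal_get_shared_item_priority := by
  intro group _ hpre
  unfold Spec_get_shared_item_priority
  obtain ⟨hlen, hall⟩ := hpre
  match group with
  | g0 :: g1 :: g2 :: rest =>
    simp only [List.take, List.all_cons, List.all_nil, Bool.and_eq_true, Bool.and_true,
      Bool.not_eq_eq_eq_not, Bool.not_true, List.all_eq_true,
      decide_eq_true_eq] at hall
    obtain ⟨⟨hne0, hok0⟩, ⟨hne1, hok1⟩, ⟨hne2, hok2⟩⟩ := hall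
    replace hne0 : g0.toList ≠ [] := by simpa using hne0
    replace hne1 : g1.toList ≠ [] := by simpa using hne1
    replace hne2 : g2.toList ≠ [] := by simpa using hne2
    unfold get_shared_item_priority get_shared_item_priority_alt
    simp only [List.getD, List.getElem?_cons_zero, List.getElem?_cons_succ, Option.getD_some]
    set m0 := rusksack2binary g0 with hm0
    set m1 := rusksack2binary g1 with hm1
    set m2 := rusksack2binary g2 with hm2
    set m := m0 &&& m1 &&& m2 with hm
    set common := PySem.Set.inter (PySem.Set.inter (prioSet g0) (prioSet g1)) (prioSet g2)
      with hcommon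
    -- membership in common, unfolded
    have hmem : ∀ x : Int, x ∈ common ↔
        ((∃ c ∈ g0.toList, get_priority c = x) ∧ (∃ c ∈ g1.toList, get_priority c = x) ∧
          (∃ c ∈ g2.toList, get_priority c = x)) := by
      intro x
      rw [hcommon]
      rw [PySem.Set.mem_inter, PySem.Set.mem_inter]
      simp only [prioSet, gp_b_eq, PySem.Set.mem_ofList, List.mem_map]
      tauto
    -- the key bit correspondence
    have key : ∀ q : Nat, m.testBit q = true ↔ ((q : Int) ∈ common) := by
      intro q
      rw [hmem, hm, Nat.testBit_and, Nat.testBit_and,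
        testBit_rusksack2binary g0 hne0, testBit_rusksack2binary g1 hne1,
        testBit_rusksack2binary g2 hne2]
      simp only [Bool.and_eq_true, List.any_eq_true, decide_eq_true_eq]
      constructor
      · rintro ⟨⟨⟨c0, hc0, he0⟩, ⟨c1, hc1, he1⟩⟩, ⟨c2, hc2, he2⟩⟩
        refine ⟨⟨c0, hc0, ?_⟩, ⟨c1, hc1, ?_⟩, ⟨c2, hc2, ?_⟩⟩ <;>
          [skip; skip; skip] <;>
          · first
            | (have hnn := gp_nonneg (hok0 _ hc0); omega)
            | (have hnn := gp_nonneg (hok1 _ hc1); omega)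
            | (have hnn := gp_nonneg (hok2 _ hc2); omega)
      · rintro ⟨⟨c0, hc0, he0⟩, ⟨c1, hc1, he1⟩, ⟨c2, hc2, he2⟩⟩
        refine ⟨⟨⟨c0, hc0, ?_⟩, ⟨c1, hc1, ?_⟩⟩, ⟨c2, hc2, ?_⟩⟩ <;> omega
    have hmemBit : ∀ x : Int, x ∈ common → 0 ≤ x ∧ m.testBit x.toNat = true := by
      intro x hx
      obtain ⟨⟨c0, hc0, he0⟩, _, _⟩ := (hmem x).1 hx
      have h0x : 0 ≤ x := he0 ▸ gp_nonneg (hok0 _ hc0)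
      refine ⟨h0x, (key x.toNat).2 ?_⟩
      rwa [Int.toNat_of_nonneg h0x]
    rw [shiftLoop_eq]
    by_cases hz : m = 0
    · -- intersection empty: both sides give -1
      have hcnil : common = [] := by
        rw [List.eq_nil_iff_forall_not_mem]
        intro x hx
        have := (hmemBit x hx).2
        rw [hz, Nat.zero_testBit] at this
        exact Bool.false_ne_true this
      rw [if_pos hcnil, hz]
      simp [PySem.Int.bitLength_zero]
    · -- nonempty intersection: max = highest set bit = bitLength - 1
      obtain ⟨htop, hbound⟩ := size_pred_spec hz
      set L := PySem.Int.bitLength (m : Int) with hL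
      have hLpos : 1 ≤ L := by
        by_contra h
        have h0 : L = 0 := by omega
        have := PySem.Int.lt_two_pow_bitLength (m : Int)
        rw [← hL, h0, pow_zero] at this
        simp at this
        omega
      have htopmem : ((L - 1 : Nat) : Int) ∈ common := (key (L - 1)).1 htop
      have hcne : common ≠ [] := by
        intro h
        rw [h] at htopmem
        exact List.not_mem_nil htopmem
      rw [if_neg hcne]
      obtain ⟨v, hv⟩ : ∃ v, PySem.List.max? common (fun x => x) = some v := by
        cases h : PySem.List.max? common (fun x => x) with
        | none => exact absurd ((PySem.List.max?_eq_none_iff _ _).1 h) hcne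
        | some v => exact ⟨v, rfl⟩
      rw [hv, Option.getD_some]
      have hvmem := PySem.List.max?_mem hv
      have hvmax := PySem.List.max?_isMax hv
      have h1 : ((L - 1 : Nat) : Int) ≤ v := hvmax _ htopmem
      have h2 : v ≤ ((L - 1 : Nat) : Int) := by
        obtain ⟨h0v, hbit⟩ := hmemBit v hvmem
        have := hbound _ hbit
        omega
      have hv' : v = ((L - 1 : Nat) : Int) := le_antisymm h2 h1
      rw [hv']
      push_cast [hLpos]
      ring
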